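-- pv_equiv track=rewrite | github.com/mikey9900/polymarket_EDEC_bot | edec_bot/bot/archive.py | _verbose_header_title
-- ===== SOURCE A (Python) =====
-- def _verbose_header_title(name: str) -> str:
--     if name.endswith("_s"):
--         return f"{_verbose_header_title(name[:-2])} (sec)"
--     if name.endswith("_pct"):
--         return f"{_verbose_header_title(name[:-4])} (%)"
--     specials = {
--         "id": "ID",
--         "pnl": "P&L",
--         "usd": "USD",
--         "utc": "UTC",
--         "json": "JSON",
--         "btc": "BTC",
--         "csv": "CSV",
--         "gz": "GZ",
--         "api": "API",
--         "avg": "Avg",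
--         "max": "Max",
--         "min": "Min",
--     }
--     words: list[str] = []
--     for part in name.split("_"):
--         lower = part.lower()
--         words.append(specials.get(lower, part.capitalize()))
--     title = " ".join(words)
--     return (
--         title.replace("Trade Id", "Trade ID")
--         .replace("Decision Id", "Decision ID")
--         .replace("Run Id", "Run ID")
--         .replace("Window Id", "Window ID")
--         .replace("App Version", "App Version")
--         .replace("Strategy Type", "Strategy")
--     )
-- ===== SOURCE B (Python) =====
-- def _verbose_header_title(name: str) -> str:
--     # Iterative suffix stripping: collect markers, then format the base once
--     # and append the markers in reverse detection order.
--     markers = []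
--     while True:
--         if name.endswith("_s"):
--             markers.append(" (sec)")
--             name = name[:-2]
--         elif name.endswith("_pct"):
--             markers.append(" (%)")
--             name = name[:-4]
--         else:
--             break
--     specials = {
--         "id": "ID",
--         "pnl": "P&L",
--         "usd": "USD",
--         "utc": "UTC",
--         "json": "JSON",
--         "btc": "BTC",
--         "csv": "CSV",
--         "gz": "GZ",
--         "api": "API",
--         "avg": "Avg",
--         "max": "Max",
--         "min": "Min",
--     }
--     words = [specials.get(part.lower(), part.capitalize()) for part in name.split("_")]
--     title = " ".join(words)
--     for old, new in (
--         ("Trade Id", "Trade ID"),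
--         ("Decision Id", "Decision ID"),
--         ("Run Id", "Run ID"),
--         ("Window Id", "Window ID"),
--         ("App Version", "App Version"),
--         ("Strategy Type", "Strategy"),
--     ):
--         title = title.replace(old, new)
--     return title + "".join(reversed(markers))
-- ===== Notes on version B (the rewrite author's own statement) =====
-- stated objective: alternative
-- what changed: Replaces the two recursive suffix cases with an iterative stripping loop that accumulates markers (appended in reverse detection order after formatting the base once), builds the word list with a comprehension instead of a loop with append, and applies the replacements by folding over a pair table instead of a hard-coded method chain.
import Mathlib
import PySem

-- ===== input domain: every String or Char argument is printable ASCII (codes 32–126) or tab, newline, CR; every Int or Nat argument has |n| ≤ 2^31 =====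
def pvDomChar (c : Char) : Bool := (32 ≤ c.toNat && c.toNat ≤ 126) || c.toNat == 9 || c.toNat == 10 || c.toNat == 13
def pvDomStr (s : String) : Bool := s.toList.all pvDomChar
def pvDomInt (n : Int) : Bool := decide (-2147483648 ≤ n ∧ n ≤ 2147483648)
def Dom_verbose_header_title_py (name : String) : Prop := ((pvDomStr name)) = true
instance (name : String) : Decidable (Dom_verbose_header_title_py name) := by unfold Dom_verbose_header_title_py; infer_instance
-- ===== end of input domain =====

-- B replaces A's two recursive suffix cases by an iterative stripping loop that collects the
-- markers and appends them (in reverse detection order) after formatting the base once;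
-- objective: alternative decomposition, same cost.

-- hand port of str.capitalize(): first char upper-cased, rest lower-cased (exact on ASCII)
def pvCapitalize (s : String) : String :=
  match s.toList with
  | [] => ""
  | c :: rest => String.ofList (PySem.Chars.upperChar c :: PySem.Chars.lower rest)

def pvSpecials : PySem.Dict String String :=
  PySem.Dict.ofList [("id","ID"),("pnl","P&L"),("usd","USD"),("utc","UTC"),("json","JSON"),
    ("btc","BTC"),("csv","CSV"),("gz","GZ"),("api","API"),("avg","Avg"),("max","Max"),("min","Min")]

-- termination helper for both recursions (name[:-k] is strictly shorter when the suffix matched)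
theorem pvSliceLen_lt (s : String) (suf : String) (k : Nat) (h1 : 1 < k)
    (hk : k ≤ suf.toList.length) (h : PySem.Str.endswith s suf = true) :
    (PySem.Str.slice s none (some (-(k : Int)))).toList.length < s.toList.length := by
  have hsuf : suf.toList <:+ s.toList := by
    have := PySem.Chars.endswith_iff (s := s.toList) (p := suf.toList)
    simp at h
    exact this.mp h
  have hsl : suf.toList.length ≤ s.toList.length := hsuf.length_le
  have hL : s.length = s.toList.length := rfl
  have hstep : (PySem.Str.slice s none (some (-(k : Int)))).toList
      = s.toList.take (s.toList.length - k) := by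
    simp
    rw [PySem.List.slice_to_neg_natCast _ _ (by omega)]
    rw [hL]
  rw [hstep]
  simp [List.length_take]
  omega

-- ===== PORT A =====
def verbose_header_title_py (name : String) : String :=
  if h1 : PySem.Str.endswith name "_s" then
    verbose_header_title_py (PySem.Str.slice name none (some (-2))) ++ " (sec)"
  else if h2 : PySem.Str.endswith name "_pct" then
    verbose_header_title_py (PySem.Str.slice name none (some (-4))) ++ " (%)"
  else
    let words := ((PySem.Str.split? name "_").getD []).foldl
      (fun acc part =>
        acc ++ [PySem.Dict.getD pvSpecials (PySem.Str.lower part) (pvCapitalize part)]) []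
    let title := PySem.Str.join " " words
    PySem.Str.replace (PySem.Str.replace (PySem.Str.replace (PySem.Str.replace
      (PySem.Str.replace (PySem.Str.replace title "Trade Id" "Trade ID")
        "Decision Id" "Decision ID") "Run Id" "Run ID") "Window Id" "Window ID")
      "App Version" "App Version") "Strategy Type" "Strategy"
termination_by name.toList.length
decreasing_by
  · exact pvSliceLen_lt name "_s" 2 (by omega) (by decide) h1
  · exact pvSliceLen_lt name "_pct" 4 (by omega) (by decide) h2

-- ===== PORT B =====
def pvReplacePairs : List (String × String) :=
  [("Trade Id","Trade ID"),("Decision Id","Decision ID"),("Run Id","Run ID"),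
   ("Window Id","Window ID"),("App Version","App Version"),("Strategy Type","Strategy")]

-- the while loop: strip suffixes, collecting markers in detection order
def pvStripLoop (name : String) (markers : List String) : String × List String :=
  if h1 : PySem.Str.endswith name "_s" then
    pvStripLoop (PySem.Str.slice name none (some (-2))) (markers ++ [" (sec)"])
  else if h2 : PySem.Str.endswith name "_pct" then
    pvStripLoop (PySem.Str.slice name none (some (-4))) (markers ++ [" (%)"])
  else (name, markers)
termination_by name.toList.length
decreasing_by
  · exact pvSliceLen_lt name "_s" 2 (by omega) (by decide) h1
  · exact pvSliceLen_lt name "_pct" 4 (by omega) (by decide) h2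

def verbose_header_title_py_alt (name : String) : String :=
  let p := pvStripLoop name []
  let words := ((PySem.Str.split? p.1 "_").getD []).map
    (fun part => PySem.Dict.getD pvSpecials (PySem.Str.lower part) (pvCapitalize part))
  let title := PySem.Str.join " " words
  let title := pvReplacePairs.foldl (fun t pr => PySem.Str.replace t pr.1 pr.2) title
  title ++ PySem.Str.join "" p.2.reverse

-- ===== PRECONDITION & SPEC =====
def Spec_verbose_header_title_py (name : String) (out : String) : Prop := out = verbose_header_title_py_alt name
instance (name : String) (out : String) : Decidable (Spec_verbose_header_title_py name out) := by unfold Spec_verbose_header_title_py; infer_instance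

-- ===== CLAIM (what is proved, stated in full; the proofs are below) =====
def Claim_equal_verbose_header_title_py : Prop := ∀ (name : String), Dom_verbose_header_title_py name → Spec_verbose_header_title_py name (verbose_header_title_py name)

-- ===== LEMMAS AND PROOFS =====

-- B's formatting core, named for the proofs (definitionally what alt does to the stripped base)
def pvCore (s : String) : String :=
  pvReplacePairs.foldl (fun t pr => PySem.Str.replace t pr.1 pr.2)
    (PySem.Str.join " " (((PySem.Str.split? s "_").getD []).map
      (fun part => PySem.Dict.getD pvSpecials (PySem.Str.lower part) (pvCapitalize part))))

theorem pvFoldl_append_eq_map {α β : Type} (f : α → β) (l : List α) (acc : List β) :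
    l.foldl (fun acc x => acc ++ [f x]) acc = acc ++ l.map f := by
  induction l generalizing acc with
  | nil => simp
  | cons x xs ih => simp [List.foldl, ih]

theorem pvCore_eq (name : String)
    (h1 : ¬ PySem.Str.endswith name "_s" = true)
    (h2 : ¬ PySem.Str.endswith name "_pct" = true) :
    verbose_header_title_py name = pvCore name := by
  rw [verbose_header_title_py]
  simp only [dif_neg h1, dif_neg h2]
  rw [pvFoldl_append_eq_map]
  simp [pvCore, pvReplacePairs, List.foldl]

theorem pvIntercalate_nil_cons (a : List Char) (l : List (List Char)) :
    ([] : List Char).intercalate (a :: l) = a ++ ([] : List Char).intercalate l := by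
  cases l with
  | nil => simp [List.intercalate]
  | cons b t => simp [List.intercalate, List.intersperse]

theorem pvJoin0_cons (x : String) (l : List String) :
    PySem.Str.join "" (x :: l) = x ++ PySem.Str.join "" l := by
  have h : (PySem.Str.join "" (x :: l)).toList = (x ++ PySem.Str.join "" l).toList := by
    simp [PySem.Str.toList_join, PySem.Chars.join, pvIntercalate_nil_cons]
  exact String.toList_inj.mp h

theorem pvStrip_spec (name : String) (ms : List String) :
    pvCore (pvStripLoop name ms).1 ++ PySem.Str.join "" (pvStripLoop name ms).2.reverse
      = verbose_header_title_py name ++ PySem.Str.join "" ms.reverse := by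
  induction name, ms using pvStripLoop.induct with
  | case1 name ms h1 ih =>
    rw [pvStripLoop, verbose_header_title_py]
    simp only [dif_pos h1]
    rw [ih, List.reverse_append, List.reverse_singleton, List.singleton_append,
      pvJoin0_cons, ← String.append_assoc]
  | case2 name ms h1 h2 ih =>
    rw [pvStripLoop, verbose_header_title_py]
    simp only [dif_neg h1, dif_pos h2]
    rw [ih, List.reverse_append, List.reverse_singleton, List.singleton_append,
      pvJoin0_cons, ← String.append_assoc]
  | case3 name ms h1 h2 =>
    rw [pvStripLoop]
    simp only [dif_neg h1, dif_neg h2]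
    rw [pvCore_eq name h1 h2]

-- ===== VERDICT (by name: the statement is the Claim_ definition above) =====
theorem verbose_header_title_py_spec : Claim_equal_verbose_header_title_py := by
  intro name _
  unfold Spec_verbose_header_title_py
  have h := pvStrip_spec name []
  have he : PySem.Str.join "" (([] : List String).reverse) = "" :=
    String.toList_inj.mp (by simp [PySem.Str.toList_join, PySem.Chars.join, List.intercalate])
  rw [he] at h
  have h2 : verbose_header_title_py name ++ "" = verbose_header_title_py name := by simp
  rw [h2] at h
  show verbose_header_title_py name = verbose_header_title_py_alt name
  rw [← h]
  rfl
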